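-- pv_equiv track=rewrite | github.com/Siocnarff/burhg | python/motion.py | different
-- ===== SOURCE A (Python) =====
-- def different(choices):
--     arr = sorted(choices)
--     prev = None
--     for key in arr:
--         if key == -1:
--             continue
--         if key == prev:
--             return key
--         prev = key
--     return None
-- ===== SOURCE B (Python) =====
-- def different(choices):
--     counts = {}
--     for x in choices:
--         counts[x] = counts.get(x, 0) + 1
--     best = None
--     for x, c in counts.items():
--         if x != -1 and c >= 2 and (best is None or x < best):
--             best = x
--     return best
-- ===== Notes on version B (the rewrite author's own statement) =====
-- stated objective: alternative
-- what changed: Replaces A's sort-then-adjacent-duplicate scan with a single counting pass into a dict followed by a running minimum over the duplicated non-(-1) keys.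
import Mathlib
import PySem

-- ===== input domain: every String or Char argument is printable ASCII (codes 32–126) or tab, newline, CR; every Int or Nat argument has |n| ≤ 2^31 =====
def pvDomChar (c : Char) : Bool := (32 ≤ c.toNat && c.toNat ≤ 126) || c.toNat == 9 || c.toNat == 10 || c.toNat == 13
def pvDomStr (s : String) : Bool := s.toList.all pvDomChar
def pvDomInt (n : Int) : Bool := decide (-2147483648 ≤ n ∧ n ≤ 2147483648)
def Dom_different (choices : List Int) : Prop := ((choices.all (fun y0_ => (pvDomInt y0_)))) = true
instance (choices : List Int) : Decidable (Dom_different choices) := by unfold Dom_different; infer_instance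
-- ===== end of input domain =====

-- B replaces A's sort+adjacent-duplicate scan by a sortless running-minimum over values
-- whose multiplicity (found by re-scanning) is at least 2; objective: alternative algorithm.

-- ===== PORT A =====
-- the for-loop over the sorted list, carrying `prev` (None = no previous non-(-1) key)
def differentLoopA : Option Int → List Int → Option Int
  | _, [] => none
  | prev, key :: rest =>
    if key = -1 then differentLoopA prev rest
    else if some key = prev then some key
    else differentLoopA (some key) rest

def different (choices : List Int) : Option Int :=
  differentLoopA none (PySem.List.sorted choices (fun x => x) false)

-- ===== PORT B =====
def different_alt (choices : List Int) : Option Int :=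
  -- counts[x] = counts.get(x, 0) + 1, over choices
  let counts : PySem.Dict Int Int :=
    choices.foldl (fun d x => d.insert x (d.getD x 0 + 1)) PySem.Dict.empty
  -- for x, c in counts.items(): keep the smallest duplicated non-(-1) key
  counts.items.foldl (fun best (p : Int × Int) =>
    match best with
    | none => if p.1 ≠ -1 ∧ 2 ≤ p.2 then some p.1 else none
    | some m => if p.1 ≠ -1 ∧ 2 ≤ p.2 ∧ p.1 < m then some p.1 else some m) none

-- ===== PRECONDITION & SPEC =====
def Spec_different (choices : List Int) (out : Option Int) : Prop := out = different_alt choices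
instance (choices : List Int) (out : Option Int) : Decidable (Spec_different choices out) := by unfold Spec_different; infer_instance

-- ===== CLAIM (what is proved, stated in full; the proofs are below) =====
def Claim_equal_different : Prop := ∀ (choices : List Int), Dom_different choices → Spec_different choices (different choices)

-- ===== LEMMAS AND PROOFS =====

-- multiplicity of x in l, as B computes it
def pvCnt (l : List Int) (x : Int) : Nat := (l.filter (fun y => y = x)).length

-- "x is a duplicated non-(-1) value of l"
def pvGood (l : List Int) (x : Int) : Bool := decide (x ≠ -1) && decide (2 ≤ pvCnt l x)

-- running minimum on Option Int
def pvOmin : Option Int → Int → Option Int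
  | none, x => some x
  | some m, x => if x < m then some x else some m

theorem pvOmin_min (m x : Int) : pvOmin (some m) x = some (min m x) := by
  simp only [pvOmin, min_def]
  split_ifs <;> first | rfl | omega

theorem pvCnt_cons_ne (a x : Int) (l : List Int) (h : x ≠ a) :
    pvCnt (a :: l) x = pvCnt l x := by
  simp [pvCnt, List.filter_cons, h.symm]

theorem pvGood_congr (l₁ l₂ : List Int) (r : List Int)
    (h : ∀ x ∈ r, pvGood l₁ x = pvGood l₂ x) :
    r.filter (pvGood l₁) = r.filter (pvGood l₂) :=
  List.filter_congr (by intro x hx; simp [h x hx])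

theorem pvCnt_eq_count (l : List Int) (x : Int) : pvCnt l x = l.count x := by
  induction l with
  | nil => rfl
  | cons a t ih =>
    by_cases h : a = x
    · simp [pvCnt, List.filter_cons, h, List.count_cons] at *
      omega
    · simp [pvCnt, List.filter_cons, h, List.count_cons] at *
      omega

-- B's second loop = fold of pvOmin over the pvGood-filtered distinct values
theorem foldl_items_filter (c : List Int) :
    ∀ (l : List Int) (b : Option Int),
      (l.map (fun k => (k, (c.count k : Int)))).foldl (fun best (p : Int × Int) =>
        match best with
        | none => if p.1 ≠ -1 ∧ 2 ≤ p.2 then some p.1 else none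
        | some m => if p.1 ≠ -1 ∧ 2 ≤ p.2 ∧ p.1 < m then some p.1 else some m) b
      = (l.filter (pvGood c)).foldl pvOmin b := by
  intro l
  induction l with
  | nil => intro b; rfl
  | cons a t ih =>
    intro b
    have hcast : ((2:Int) ≤ (c.count a : Int)) ↔ 2 ≤ c.count a := by exact_mod_cast Iff.rfl
    have hstep : (match b with
        | none => if a ≠ -1 ∧ 2 ≤ ((c.count a : Int)) then some a else none
        | some m => if a ≠ -1 ∧ 2 ≤ ((c.count a : Int)) ∧ a < m then some a else some m)
        = if pvGood c a then pvOmin b a else b := by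
      cases b with
      | none =>
        by_cases h1 : a = -1 <;> by_cases h2 : 2 ≤ c.count a <;>
          simp [pvGood, pvOmin, pvCnt_eq_count, h1, h2, hcast]
      | some m =>
        by_cases h1 : a = -1 <;> by_cases h2 : 2 ≤ c.count a <;> by_cases h3 : a < m <;>
          simp [pvGood, pvOmin, pvCnt_eq_count, h1, h2, h3, hcast] <;> omega
    simp only [List.map_cons, List.foldl_cons, List.filter_cons, hstep]
    by_cases hg : pvGood c a = true
    · simp only [hg, if_true, List.foldl_cons]
      exact ih (pvOmin b a)
    · simp only [Bool.not_eq_true] at hg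
      simp only [hg, Bool.false_eq_true, if_false]
      exact ih b

theorem foldl_min_self : ∀ (t : List Int) (a : Int), (∀ y ∈ t, a ≤ y) → t.foldl min a = a := by
  intro t
  induction t with
  | nil => intro a _; rfl
  | cons b t ih =>
    intro a h
    have hab : a ≤ b := h b (by simp)
    have : min a b = a := min_eq_left hab
    simp only [List.foldl_cons, this]
    exact ih a (fun y hy => h y (by simp [hy]))

theorem foldl_omin_some : ∀ (t : List Int) (m : Int), t.foldl pvOmin (some m) = some (t.foldl min m) := by
  intro t
  induction t with
  | nil => intro m; rfl
  | cons b t ih => intro m; simp only [List.foldl_cons, pvOmin_min, ih]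

theorem foldl_min_mem : ∀ (t : List Int) (a : Int), t.foldl min a ∈ a :: t := by
  intro t
  induction t with
  | nil => intro a; simp
  | cons b t ih =>
    intro a
    have h := ih (min a b)
    simp only [List.foldl_cons, List.mem_cons]
    rcases List.mem_cons.mp h with h | h
    · rcases min_choice a b with hm | hm
      · exact Or.inl (h.trans hm)
      · exact Or.inr (Or.inl (h.trans hm))
    · exact Or.inr (Or.inr h)

theorem foldl_min_le : ∀ (t : List Int) (a : Int), t.foldl min a ≤ a ∧ ∀ y ∈ t, t.foldl min a ≤ y := by
  intro t
  induction t with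
  | nil => intro a; simp
  | cons b t ih =>
    intro a
    obtain ⟨h1, h2⟩ := ih (min a b)
    refine ⟨le_trans h1 (min_le_left a b), ?_⟩
    intro y hy
    rcases List.mem_cons.mp hy with rfl | hy
    · exact le_trans h1 (min_le_right a y)
    · exact h2 y hy

-- the running minimum only depends on which values occur
theorem foldl_omin_congr (l₁ l₂ : List Int) (h : ∀ x, x ∈ l₁ ↔ x ∈ l₂) :
    l₁.foldl pvOmin none = l₂.foldl pvOmin none := by
  cases l₁ with
  | nil =>
    cases l₂ with
    | nil => rfl
    | cons b u => exact absurd ((h b).mpr (by simp)) (by simp)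
  | cons a t =>
    cases l₂ with
    | nil => exact absurd ((h a).mp (by simp)) (by simp)
    | cons b u =>
      simp only [List.foldl_cons, show pvOmin none a = some a from rfl,
        show pvOmin none b = some b from rfl, foldl_omin_some]
      have hm1 := foldl_min_mem t a
      have hm2 := foldl_min_mem u b
      obtain ⟨hle1a, hle1⟩ := foldl_min_le t a
      obtain ⟨hle2b, hle2⟩ := foldl_min_le u b
      have hub1 : ∀ y ∈ a :: t, t.foldl min a ≤ y := by
        intro y hy; rcases List.mem_cons.mp hy with rfl | hy
        · exact hle1a
        · exact hle1 y hy
      have hub2 : ∀ y ∈ b :: u, u.foldl min b ≤ y := by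
        intro y hy; rcases List.mem_cons.mp hy with rfl | hy
        · exact hle2b
        · exact hle2 y hy
      have h12 : u.foldl min b ≤ t.foldl min a := hub2 _ ((h _).mp hm1)
      have h21 : t.foldl min a ≤ u.foldl min b := hub1 _ ((h _).mpr hm2)
      exact congrArg some (le_antisymm h21 h12)

-- on a ≤-sorted list, the running minimum is the head
theorem foldl_omin_sorted (l : List Int) (h : l.Pairwise (· ≤ ·)) :
    l.foldl pvOmin none = l.head? := by
  cases l with
  | nil => rfl
  | cons a t =>
    have ha : ∀ y ∈ t, a ≤ y := (List.pairwise_cons.mp h).1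
    simp [List.foldl_cons, pvOmin, foldl_omin_some, foldl_min_self t a ha]

-- A's loop on a sorted list finds the head of the pvGood-filtered list
theorem loopA_char : ∀ (l : List Int), l.Pairwise (· ≤ ·) →
    ((∀ q : Int, q ≠ -1 → (∀ y ∈ l, q ≤ y) →
        differentLoopA (some q) l =
          if l.head? = some q then some q else (l.filter (pvGood l)).head?)
     ∧ differentLoopA none l = (l.filter (pvGood l)).head?) := by
  intro l
  induction l with
  | nil => intro _; exact ⟨fun q _ _ => by simp [differentLoopA], rfl⟩
  | cons a rest ih =>
    intro hp
    have hpr := List.pairwise_cons.mp hp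
    have ha : ∀ y ∈ rest, a ≤ y := hpr.1
    have ihr := ih hpr.2
    -- the common "else" computation: prev can never match again
    have key : a ≠ -1 → differentLoopA (some a) (a :: rest) = some a := by
      intro h1; simp [differentLoopA, h1]
    have main : differentLoopA none (a :: rest) = ((a :: rest).filter (pvGood (a :: rest))).head? := by
      by_cases h1 : a = -1
      · -- a = -1 : skipped by the loop and by the filter; counts of other values unchanged
        subst h1
        have : differentLoopA none (-1 :: rest) = differentLoopA none rest := by
          simp [differentLoopA]
        rw [this, ihr.2]
        have hg : rest.filter (pvGood rest) = rest.filter (pvGood (-1 :: rest)) := by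
          apply pvGood_congr
          intro x hx
          by_cases hx1 : x = -1
          · simp [pvGood, hx1]
          · simp [pvGood, pvCnt_cons_ne _ _ _ hx1]
        simp [List.filter_cons, pvGood, hg]
      · -- a ≠ -1 : loop moves to prev = a
        have hstep : differentLoopA none (a :: rest) = differentLoopA (some a) rest := by
          simp [differentLoopA, h1]
        rw [hstep, ihr.1 a h1 ha]
        by_cases h2 : rest.head? = some a
        · -- a duplicated: it heads the filtered list
          obtain ⟨rest', hr⟩ : ∃ rest', rest = a :: rest' := by
            cases rest with
            | nil => simp at h2
            | cons b t =>
              have hba : b = a := by simpa using h2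
              exact ⟨t, by simp [hba]⟩
          have hcnt : 2 ≤ pvCnt (a :: rest) a := by
            simp [hr, pvCnt, List.filter_cons]
          have hg : pvGood (a :: rest) a = true := by
            simp [pvGood, h1, hcnt]
          simp [h2, List.filter_cons, hg]
        · -- a not duplicated: every later element is strictly greater
          have hgt : ∀ y ∈ rest, a < y := by
            intro y hy
            rcases lt_or_eq_of_le (ha y hy) with h | h
            · exact h
            · exfalso
              cases rest with
              | nil => simp at hy
              | cons b t =>
                rcases List.mem_cons.mp hy with rfl | hyt
                · exact h2 (by simp [← h])
                · have hb : a ≤ b := ha b (by simp)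
                  have hby : b ≤ y := (List.pairwise_cons.mp hpr.2).1 y hyt
                  have : b = a := le_antisymm (h ▸ hby) hb
                  exact h2 (by simp [this])
          have hnotg : pvGood (a :: rest) a = false := by
            have : pvCnt (a :: rest) a = 1 := by
              have : rest.filter (fun y => y = a) = [] := by
                apply List.filter_eq_nil_iff.mpr
                intro y hy
                simp [ne_of_gt (hgt y hy)]
              simp [pvCnt, List.filter_cons, this]
            simp [pvGood, this]
          have hgr : rest.filter (pvGood rest) = rest.filter (pvGood (a :: rest)) := by
            apply pvGood_congr
            intro x hx
            have : x ≠ a := ne_of_gt (hgt x hx)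
            simp [pvGood, pvCnt_cons_ne _ _ _ this]
          simp [h2, List.filter_cons, hnotg, hgr]
    refine ⟨?_, main⟩
    intro q hq hql
    by_cases hqa : a = q
    · subst hqa
      simp [differentLoopA, hq]
    · have hhd : (a :: rest).head? ≠ some q := by simp [hqa]
      rw [if_neg hhd]
      by_cases h1 : a = -1
      · -- q < -1 = a ≤ rest, so q never matches; behaves like the none case
        subst h1
        have hq' : q < -1 := lt_of_le_of_ne (hql _ (by simp)) hq
        have hstep : differentLoopA (some q) (-1 :: rest) = differentLoopA (some q) rest := by
          simp [differentLoopA]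
        have hnr : rest.head? ≠ some q := by
          cases rest with
          | nil => simp
          | cons b t =>
            have : (-1 : Int) ≤ b := ha b (by simp)
            simp; omega
        rw [hstep, ihr.1 q hq (fun y hy => le_of_lt (lt_of_lt_of_le hq' (ha y hy))), if_neg hnr]
        -- same filter bookkeeping as the none / a = -1 case
        have hg : rest.filter (pvGood rest) = rest.filter (pvGood (-1 :: rest)) := by
          apply pvGood_congr
          intro x hx
          by_cases hx1 : x = -1
          · simp [pvGood, hx1]
          · simp [pvGood, pvCnt_cons_ne _ _ _ hx1]
        simp [List.filter_cons, pvGood, hg]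
      · have hstep : differentLoopA (some q) (a :: rest) = differentLoopA (some a) rest := by
          simp [differentLoopA, h1, hqa]
        have hstep' : differentLoopA none (a :: rest) = differentLoopA (some a) rest := by
          simp [differentLoopA, h1]
        rw [hstep, ← hstep', main]

-- ===== VERDICT (by name: the statement is the Claim_ definition above) =====
theorem different_spec : Claim_equal_different := by
  intro choices _
  unfold Spec_different
  set s := PySem.List.sorted choices (fun x => x) false with hs
  have hperm : s.Perm choices := PySem.List.sorted_perm ..
  have hpair : s.Pairwise (· ≤ ·) := by
    have := PySem.List.sorted_pairwise (xs := choices) (key := fun x : Int => x)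
    simpa using this
  -- A = head of the good-filtered sorted list
  have hA : different choices = (s.filter (pvGood s)).head? := by
    unfold different
    exact (loopA_char s hpair).2
  -- counts (hence goodness) only depend on the multiset
  have hgood : s.filter (pvGood s) = s.filter (pvGood choices) := by
    apply pvGood_congr
    intro x _
    have : pvCnt s x = pvCnt choices x := (hperm.filter _).length_eq
    simp [pvGood, this]
  -- filtered sorted list is sorted, so its head is its running minimum
  have hfpair : (s.filter (pvGood choices)).Pairwise (· ≤ ·) :=
    hpair.sublist List.filter_sublist
  have hmin : (s.filter (pvGood choices)).head? = (s.filter (pvGood choices)).foldl pvOmin none :=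
    (foldl_omin_sorted _ hfpair).symm
  -- B = counting dict, then fold of pvOmin over the good distinct values
  have hB : different_alt choices
      = ((PySem.Set.ofList choices).filter (pvGood choices)).foldl pvOmin none := by
    show ((PySem.Dict.counter choices).items.foldl (fun best (p : Int × Int) =>
      match best with
      | none => if p.1 ≠ -1 ∧ 2 ≤ p.2 then some p.1 else none
      | some m => if p.1 ≠ -1 ∧ 2 ≤ p.2 ∧ p.1 < m then some p.1 else some m) none)
      = ((PySem.Set.ofList choices).filter (pvGood choices)).foldl pvOmin none
    rw [PySem.Dict.items_counter]
    exact foldl_items_filter choices (PySem.Set.ofList choices) none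
  -- the two filtered lists hold the same values, so the running minima agree
  have hmem : ∀ x, x ∈ s.filter (pvGood choices) ↔ x ∈ (PySem.Set.ofList choices).filter (pvGood choices) := by
    intro x
    simp only [List.mem_filter, ← PySem.List.dedup_eq_ofList, PySem.List.mem_dedup]
    exact and_congr_left (fun _ => ⟨fun hx => hperm.mem_iff.mp hx, fun hx => hperm.mem_iff.mpr hx⟩)
  rw [hA, hgood, hmin, hB]
  exact foldl_omin_congr _ _ hmem
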